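-- pv_equiv track=rewrite | github.com/jramaswami/Binary_Search_Python | sort_by_permutation.py | solve
-- ===== SOURCE A (Python) =====
-- def solve(lst, p):
--     i = 0
--     while i < len(lst):
--         if i == p[i]:
--             i += 1
--         else:
--             j = p[i]
--             p[i], p[j] = p[j], p[i]
--             lst[i], lst[j] = lst[j], lst[i]
--     return lst
-- ===== SOURCE B (Python) =====
-- def solve(lst, p):
--     # One-pass scatter instead of cycle-chasing swaps: element i goes to slot p[i].
--     # Mutates lst in place (like A) and sets the used prefix of p to the identity
--     # (A leaves p that way after its swaps).
--     n = len(lst)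
--     result = [None] * n
--     for i, x in enumerate(lst):
--         result[p[i]] = x
--     lst[:] = result
--     for i in range(n):
--         p[i] = i
--     return lst
-- ===== Notes on version B (the rewrite author's own statement) =====
-- stated objective: simpler
-- what changed: Replaces A's in-place cycle-chasing swap loop with a single forward scatter pass into a fresh list (result[p[i]] = lst[i]) written back to lst.
-- outside the precondition, e.g. on solve([7], [-1, 0]): A returns [7], B returns [7]
import Mathlib
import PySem

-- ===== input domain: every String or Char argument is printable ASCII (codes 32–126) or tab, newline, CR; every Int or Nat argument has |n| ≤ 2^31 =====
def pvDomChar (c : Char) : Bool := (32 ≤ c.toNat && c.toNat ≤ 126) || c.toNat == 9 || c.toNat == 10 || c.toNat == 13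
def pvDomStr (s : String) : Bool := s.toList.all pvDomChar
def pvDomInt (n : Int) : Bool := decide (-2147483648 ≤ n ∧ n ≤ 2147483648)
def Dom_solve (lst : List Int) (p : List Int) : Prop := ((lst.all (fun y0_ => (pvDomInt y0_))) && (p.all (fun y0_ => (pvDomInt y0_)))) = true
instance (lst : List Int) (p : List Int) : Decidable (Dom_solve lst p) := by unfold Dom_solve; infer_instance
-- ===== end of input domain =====

-- B replaces A's in-place cycle-chasing swap loop by a one-pass scatter into a fresh list
-- (objective: simpler). Both Pythons mutate lst (and the first len(lst) entries of p) in place;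
-- the equivalence proved here is about the RETURN value.

-- ===== PORT A =====
-- A's while-loop, with a fuel counter: under Pre_solve the loop performs at most
-- lst.length increments plus lst.length swaps, so fuel 2*lst.length+1 is never exhausted
-- (proved in loop_correct below).  Index reads use getD 0; under Pre_solve every index read
-- is in range and nonnegative, so this matches Python's lst[i]/p[i].
def solveLoop : Nat → Nat → List Int → List Int → List Int
  | 0, _, lst, _ => lst
  | fuel + 1, i, lst, p =>
    if i < lst.length then
      if (i : Int) = p.getD i 0 then
        solveLoop fuel (i + 1) lst p
      else
        -- j = p[i]; p[i], p[j] = p[j], p[i]; lst[i], lst[j] = lst[j], lst[i]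
        let j := (p.getD i 0).toNat
        solveLoop fuel i
          ((lst.set i (lst.getD j 0)).set j (lst.getD i 0))
          ((p.set i (p.getD j 0)).set j (p.getD i 0))
    else lst

def solve (lst : List Int) (p : List Int) : List Int :=
  solveLoop (2 * lst.length + 1) 0 lst p

-- ===== PORT B =====
-- result = [None]*n; for i, x in enumerate(lst): result[p[i]] = x; lst[:] = result; return lst.
-- The None placeholder is modeled by 0: under Pre_solve every slot is overwritten.
-- (Source B also resets p's first n entries to the identity — a side effect on p only,
-- not part of the returned value.)
def solve_alt (lst : List Int) (p : List Int) : List Int :=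
  (List.range lst.length).foldl
    (fun res i => res.set (p.getD i 0).toNat (lst.getD i 0))
    (List.replicate lst.length 0)

-- ===== PRECONDITION & SPEC =====
-- Pre_solve: the first len(lst) entries of p are a permutation of 0..len(lst)-1 (p may have
-- extra tail entries, which A never touches).  Outside this, A diverges or raises IndexError,
-- except for accidental terminating cases reached through Python's negative-index wraparound,
-- which are excluded as artefacts of A's implementation (see cites).
def Pre_solve (lst : List Int) (p : List Int) : Prop :=
  lst.length ≤ p.length ∧ (p.take lst.length).Perm ((List.range lst.length).map Int.ofNat)
instance (lst : List Int) (p : List Int) : Decidable (Pre_solve lst p) := by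
  unfold Pre_solve; infer_instance

def pvWitness_solve : List Int × List Int := ([10, 20, 30], [2, 0, 1])

def Spec_solve (lst : List Int) (p : List Int) (out : List Int) : Prop := out = solve_alt lst p
instance (lst : List Int) (p : List Int) (out : List Int) : Decidable (Spec_solve lst p out) := by
  unfold Spec_solve; infer_instance

-- ===== CLAIM (what is proved, stated in full; the proofs are below) =====
def Claim_equal_solve : Prop :=
  ∀ (lst : List Int) (p : List Int), Dom_solve lst p → Pre_solve lst p →
    Spec_solve lst p (solve lst p)

-- ===== LEMMAS AND PROOFS =====

lemma getD_set_self (l : List Int) (i : Nat) (a : Int) (h : i < l.length) :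
    (l.set i a).getD i 0 = a := by
  simp [List.getD, h]

lemma getD_set_ne (l : List Int) (i k : Nat) (a : Int) (h : i ≠ k) :
    (l.set i a).getD k 0 = l.getD k 0 := by
  simp [List.getD, h]

lemma getD_swap (q : List Int) (i j : Nat) (hi : i < q.length) (hj : j < q.length) (k : Nat) :
    ((q.set i (q.getD j 0)).set j (q.getD i 0)).getD k 0 =
      if k = j then q.getD i 0 else if k = i then q.getD j 0 else q.getD k 0 := by
  by_cases hkj : k = j
  · subst hkj
    simp [getD_set_self, hj]
  · rw [getD_set_ne _ _ _ _ (fun h => hkj h.symm)]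
    by_cases hki : k = i
    · subst hki
      rw [if_neg hkj, if_pos rfl]
      exact getD_set_self _ _ _ hi
    · rw [if_neg hkj, if_neg hki]
      exact getD_set_ne _ _ _ _ (fun h => hki h.symm)

-- a transposition of two entries preserves injectivity of the first n entries
lemma swap_inj (p : List Int) (n i j : Nat) (hi2 : i < p.length) (hj2 : j < p.length)
    (hi : i < n) (hj : j < n) (hij : i ≠ j)
    (hinj : ∀ k1 k2, k1 < n → k2 < n → p.getD k1 0 = p.getD k2 0 → k1 = k2) :
    ∀ k1 k2, k1 < n → k2 < n →
      ((p.set i (p.getD j 0)).set j (p.getD i 0)).getD k1 0 =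
        ((p.set i (p.getD j 0)).set j (p.getD i 0)).getD k2 0 → k1 = k2 := by
  have hσ : ∀ k, ((p.set i (p.getD j 0)).set j (p.getD i 0)).getD k 0 =
      p.getD (if k = j then i else if k = i then j else k) 0 := by
    intro k
    rw [getD_swap p i j hi2 hj2 k]
    split_ifs <;> rfl
  intro k1 k2 h1 h2 h
  rw [hσ k1, hσ k2] at h
  have hs1 : (if k1 = j then i else if k1 = i then j else k1) < n := by split_ifs <;> omega
  have hs2 : (if k2 = j then i else if k2 = i then j else k2) < n := by split_ifs <;> omega
  have heq := hinj _ _ hs1 hs2 h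
  split_ifs at heq <;> omega

lemma foldl_set_length (l : List Nat) (acc : List Int) (g : Nat → Nat) (v : Nat → Int) :
    (l.foldl (fun res i => res.set (g i) (v i)) acc).length = acc.length := by
  induction l generalizing acc with
  | nil => rfl
  | cons a l ih => simp [List.foldl, ih]

lemma alt_length (lst p : List Int) : (solve_alt lst p).length = lst.length := by
  unfold solve_alt
  rw [foldl_set_length _ _ (fun i => (p.getD i 0).toNat) (fun i => lst.getD i 0)]
  simp

-- every slot written during the first m steps of the scatter keeps its value
lemma scatter_fold_get (lst p : List Int) (m : Nat) (hm : m ≤ lst.length)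
    (hrange : ∀ k, k < lst.length → 0 ≤ p.getD k 0 ∧ (p.getD k 0).toNat < lst.length)
    (hinj : ∀ k1 k2, k1 < lst.length → k2 < lst.length → p.getD k1 0 = p.getD k2 0 → k1 = k2)
    (acc : List Int) (hacc : acc.length = lst.length) (k : Nat) (hk : k < m) :
    ((List.range m).foldl (fun res i => res.set (p.getD i 0).toNat (lst.getD i 0)) acc).getD
        (p.getD k 0).toNat 0 = lst.getD k 0 := by
  induction m with
  | zero => omega
  | succ m ih =>
    rw [List.range_succ, List.foldl_append]
    simp only [List.foldl]
    by_cases hkm : k = m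
    · subst hkm
      apply getD_set_self
      rw [foldl_set_length _ _ (fun i => (p.getD i 0).toNat) (fun i => lst.getD i 0), hacc]
      exact (hrange k (by omega)).2
    · rw [getD_set_ne]
      · exact ih (by omega) (by omega)
      · intro h
        have hk' : k < lst.length := by omega
        have hm' : m < lst.length := by omega
        have := hinj m k hm' hk' ?_
        · omega
        · have h1 := (hrange m hm').1
          have h2 := (hrange k hk').1
          omega

lemma scatter_get (lst p : List Int)
    (hrange : ∀ k, k < lst.length → 0 ≤ p.getD k 0 ∧ (p.getD k 0).toNat < lst.length)
    (hinj : ∀ k1 k2, k1 < lst.length → k2 < lst.length → p.getD k1 0 = p.getD k2 0 → k1 = k2)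
    (k : Nat) (hk : k < lst.length) :
    (solve_alt lst p).getD (p.getD k 0).toNat 0 = lst.getD k 0 :=
  scatter_fold_get lst p lst.length le_rfl hrange hinj _ (by simp) k hk

lemma list_ext_getD (a b : List Int) (hlen : a.length = b.length)
    (h : ∀ t, t < b.length → a.getD t 0 = b.getD t 0) : a = b := by
  apply List.ext_getElem hlen
  intro t h1 h2
  have := h t h2
  rwa [List.getD_eq_getElem a 0 h1, List.getD_eq_getElem b 0 h2] at this

lemma scatter_id (lst p : List Int)
    (hid : ∀ k, k < lst.length → p.getD k 0 = (k : Int)) :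
    solve_alt lst p = lst := by
  apply list_ext_getD _ _ (alt_length lst p)
  intro t ht
  have h := scatter_get lst p
    (fun k hk => by rw [hid k hk]; constructor <;> simp <;> omega)
    (fun k1 k2 h1 h2 h => by rw [hid k1 h1, hid k2 h2] at h; exact_mod_cast h)
    t ht
  rwa [hid t ht] at h

-- the scatter result is invariant under A's simultaneous swap of lst[i],lst[j] and p[i],p[j]
lemma scatter_swap (lst p : List Int) (i j : Nat)
    (hi : i < lst.length) (hj : j < lst.length) (hij : i ≠ j)
    (hlen : lst.length ≤ p.length)
    (hrange : ∀ k, k < lst.length → 0 ≤ p.getD k 0 ∧ (p.getD k 0).toNat < lst.length)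
    (hinj : ∀ k1 k2, k1 < lst.length → k2 < lst.length → p.getD k1 0 = p.getD k2 0 → k1 = k2)
    (hsurj : ∀ t, t < lst.length → ∃ k, k < lst.length ∧ p.getD k 0 = (t : Int)) :
    solve_alt ((lst.set i (lst.getD j 0)).set j (lst.getD i 0))
      ((p.set i (p.getD j 0)).set j (p.getD i 0)) = solve_alt lst p := by
  set lst' := (lst.set i (lst.getD j 0)).set j (lst.getD i 0) with hlst'
  set p' := (p.set i (p.getD j 0)).set j (p.getD i 0) with hp'
  have hjp : j < p.length := by omega
  have hip : i < p.length := by omega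
  have hlen' : lst'.length = lst.length := by simp [hlst']
  have hpget : ∀ k, p'.getD k 0 =
      if k = j then p.getD i 0 else if k = i then p.getD j 0 else p.getD k 0 :=
    fun k => getD_swap p i j hip hjp k
  have hlget : ∀ k, lst'.getD k 0 =
      if k = j then lst.getD i 0 else if k = i then lst.getD j 0 else lst.getD k 0 :=
    fun k => getD_swap lst i j hi hj k
  have hrange' : ∀ k, k < lst'.length → 0 ≤ p'.getD k 0 ∧ (p'.getD k 0).toNat < lst'.length := by
    intro k hk
    rw [hlen'] at hk
    rw [hlen', hpget k]
    split_ifs with h1 h2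
    · exact hrange i hi
    · exact hrange j hj
    · exact hrange k hk
  have hinj' : ∀ k1 k2, k1 < lst'.length → k2 < lst'.length →
      p'.getD k1 0 = p'.getD k2 0 → k1 = k2 := by
    intro k1 k2 h1 h2 h
    rw [hlen'] at h1 h2
    exact swap_inj p lst.length i j hip hjp hi hj hij hinj k1 k2 h1 h2 h
  apply list_ext_getD _ _ (by rw [alt_length, alt_length, hlen'])
  rw [alt_length]
  intro t ht
  obtain ⟨k, hk, hpk⟩ := hsurj t ht
  have htn : (p.getD k 0).toNat = t := by rw [hpk]; simp
  have hR : (solve_alt lst p).getD t 0 = lst.getD k 0 := by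
    rw [← htn]; exact scatter_get lst p hrange hinj k hk
  rcases eq_or_ne k i with hki | hki
  · have h1 : (p'.getD j 0).toNat = t := by rw [hpget j]; rw [if_pos rfl, ← hki, htn]
    have hLval : lst'.getD j 0 = lst.getD i 0 := by rw [hlget j]; exact if_pos rfl
    have hL := scatter_get lst' p' hrange' hinj' j (by omega)
    rw [h1, hLval] at hL
    rw [hL, hR, hki]
  · rcases eq_or_ne k j with hkj | hkj
    · have h1 : (p'.getD i 0).toNat = t := by
        rw [hpget i]; rw [if_neg hij, if_pos rfl, ← hkj, htn]
      have hLval : lst'.getD i 0 = lst.getD j 0 := by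
        rw [hlget i]; rw [if_neg hij]; exact if_pos rfl
      have hL := scatter_get lst' p' hrange' hinj' i (by omega)
      rw [h1, hLval] at hL
      rw [hL, hR, hkj]
    · have h1 : (p'.getD k 0).toNat = t := by rw [hpget k]; rw [if_neg hkj, if_neg hki, htn]
      have hLval : lst'.getD k 0 = lst.getD k 0 := by
        rw [hlget k]; rw [if_neg hkj, if_neg hki]
      have hL := scatter_get lst' p' hrange' hinj' k (by omega)
      rw [h1, hLval] at hL
      rw [hL, hR]

-- number of not-yet-fixed positions of p below n; A's swap step strictly decreases it
def cntNF (p : List Int) (n : Nat) : Nat :=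
  ((Finset.range n).filter (fun k => p.getD k 0 ≠ (k : Int))).card

lemma cntNF_le (p : List Int) (n : Nat) : cntNF p n ≤ n := by
  unfold cntNF
  calc ((Finset.range n).filter _).card ≤ (Finset.range n).card := Finset.card_filter_le _ _
    _ = n := Finset.card_range n

lemma cntNF_swap_lt (p : List Int) (n i j : Nat)
    (hi : i < n) (hj : j < n) (hij : i ≠ j) (hip : i < p.length) (hjp : j < p.length)
    (hpij : p.getD i 0 = (j : Int))
    (hinj : ∀ k1 k2, k1 < n → k2 < n → p.getD k1 0 = p.getD k2 0 → k1 = k2) :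
    cntNF ((p.set i (p.getD j 0)).set j (p.getD i 0)) n < cntNF p n := by
  have hpget : ∀ k, ((p.set i (p.getD j 0)).set j (p.getD i 0)).getD k 0 =
      if k = j then p.getD i 0 else if k = i then p.getD j 0 else p.getD k 0 :=
    fun k => getD_swap p i j hip hjp k
  have hpjj : p.getD j 0 ≠ (j : Int) := by
    intro h
    exact hij (hinj i j hi hj (by rw [hpij, h]))
  apply Finset.card_lt_card
  constructor
  · intro k hk
    simp only [Finset.mem_filter, Finset.mem_range] at hk ⊢
    obtain ⟨hkn, hknf⟩ := hk
    rw [hpget k] at hknf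
    refine ⟨hkn, ?_⟩
    split_ifs at hknf with h1 h2
    · subst h1; rw [hpij] at hknf; exact absurd rfl hknf
    · subst h2; rw [hpij]
      exact fun h => hij (by exact_mod_cast h.symm)
    · exact hknf
  · intro hsub
    have hjmem : j ∈ (Finset.range n).filter (fun k => p.getD k 0 ≠ (k : Int)) := by
      simp only [Finset.mem_filter, Finset.mem_range]; exact ⟨hj, hpjj⟩
    have hmem := hsub hjmem
    rw [Finset.mem_filter] at hmem
    exact hmem.2 (by rw [hpget j, if_pos rfl, hpij])

-- main loop invariant: the while loop computes the scatter of its current state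
lemma loop_correct (fuel : Nat) : ∀ (i : Nat) (lst p : List Int),
    lst.length ≤ p.length →
    (∀ k, k < lst.length → 0 ≤ p.getD k 0 ∧ (p.getD k 0).toNat < lst.length) →
    (∀ k1 k2, k1 < lst.length → k2 < lst.length → p.getD k1 0 = p.getD k2 0 → k1 = k2) →
    (∀ t, t < lst.length → ∃ k, k < lst.length ∧ p.getD k 0 = (t : Int)) →
    (∀ k, k < i → p.getD k 0 = (k : Int)) →
    (lst.length - i) + cntNF p lst.length < fuel →
    solveLoop fuel i lst p = solve_alt lst p := by
  induction fuel with
  | zero => intro i lst p _ _ _ _ _ hf; omega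
  | succ fuel ih =>
    intro i lst p hlen hrange hinj hsurj hpre hf
    rw [solveLoop]
    by_cases hi : i < lst.length
    · rw [if_pos hi]
      by_cases hfix : (i : Int) = p.getD i 0
      · rw [if_pos hfix]
        apply ih (i + 1) lst p hlen hrange hinj hsurj
        · intro k hk
          rcases Nat.lt_or_ge k i with h | h
          · exact hpre k h
          · have : k = i := by omega
            subst this; exact hfix.symm
        · omega
      · rw [if_neg hfix]
        set j := (p.getD i 0).toNat with hjdef
        have hpi0 := (hrange i hi).1
        have hjn : j < lst.length := (hrange i hi).2
        have hpij : p.getD i 0 = (j : Int) := by rw [hjdef, Int.toNat_of_nonneg hpi0]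
        have hij : i ≠ j := by
          intro h; apply hfix; rw [hpij, ← h]
        have hjp : j < p.length := by omega
        have hip : i < p.length := by omega
        rw [ih i _ _ (by simpa using hlen)
          (by
            intro k hk
            simp only [List.length_set] at hk
            rw [List.length_set, List.length_set, getD_swap p i j hip hjp k]
            split_ifs with h1 h2
            · exact hrange i hi
            · exact hrange j hjn
            · exact hrange k hk)
          (by
            intro k1 k2 h1 h2 h
            simp only [List.length_set] at h1 h2
            exact swap_inj p lst.length i j hip hjp hi hjn hij hinj k1 k2 h1 h2 h)
          (by
            intro t ht
            simp only [List.length_set] at ht ⊢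
            obtain ⟨k, hk, hpk⟩ := hsurj t ht
            rcases eq_or_ne k i with hki | hki
            · exact ⟨j, hjn, by rw [getD_swap p i j hip hjp j, if_pos rfl, ← hki, hpk]⟩
            · rcases eq_or_ne k j with hkj | hkj
              · exact ⟨i, hi, by
                  rw [getD_swap p i j hip hjp i, if_neg hij, if_pos rfl, ← hkj, hpk]⟩
              · exact ⟨k, hk, by
                  rw [getD_swap p i j hip hjp k, if_neg hkj, if_neg hki, hpk]⟩)
          (by
            intro k hk
            have hkj : k ≠ j := by
              intro h
              have : i = k := hinj i k hi (by omega) (by rw [hpij, ← h]; exact (hpre k hk).symm)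
              omega
            have hki : k ≠ i := by omega
            rw [getD_swap p i j hip hjp k, if_neg hkj, if_neg hki]
            exact hpre k hk)
          (by
            simp only [List.length_set]
            have := cntNF_swap_lt p lst.length i j hi hjn hij hip hjp hpij hinj
            omega)]
        exact scatter_swap lst p i j hi hjn hij hlen hrange hinj hsurj
    · rw [if_neg hi]
      exact (scatter_id lst p (fun k hk => hpre k (by omega))).symm

-- bridge from Pre_solve to the pointwise invariants used by loop_correct
lemma pre_facts (lst p : List Int) (h : Pre_solve lst p) :
    (∀ k, k < lst.length → 0 ≤ p.getD k 0 ∧ (p.getD k 0).toNat < lst.length) ∧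
    (∀ k1 k2, k1 < lst.length → k2 < lst.length → p.getD k1 0 = p.getD k2 0 → k1 = k2) ∧
    (∀ t, t < lst.length → ∃ k, k < lst.length ∧ p.getD k 0 = (t : Int)) := by
  obtain ⟨hlen, hperm⟩ := h
  set n := lst.length
  have htlen : (p.take n).length = n := by simp [List.length_take]; omega
  have hgetD : ∀ k, k < n → p.getD k 0 = (p.take n).getD k 0 := by
    intro k hk
    rw [List.getD_eq_getElem p 0 (by omega), List.getD_eq_getElem _ 0 (by omega),
      List.getElem_take]
  have hmem : ∀ k, k < n → ∃ m, m < n ∧ p.getD k 0 = (m : Int) := by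
    intro k hk
    have hx : (p.take n).getD k 0 ∈ p.take n := by
      rw [List.getD_eq_getElem _ 0 (by omega)]
      exact List.getElem_mem _
    rw [hperm.mem_iff] at hx
    simp only [List.mem_map, List.mem_range] at hx
    obtain ⟨m, hm, hmeq⟩ := hx
    exact ⟨m, hm, by rw [hgetD k hk, ← hmeq]; rfl⟩
  have hnodup : (p.take n).Nodup := by
    rw [hperm.nodup_iff]
    exact (List.nodup_range).map (fun a b hab => Int.ofNat.inj hab)
  refine ⟨?_, ?_, ?_⟩
  · intro k hk
    obtain ⟨m, hm, hmeq⟩ := hmem k hk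
    rw [hmeq]
    constructor
    · exact_mod_cast Nat.zero_le m
    · simpa using hm
  · intro k1 k2 h1 h2 hk
    rw [hgetD k1 h1, hgetD k2 h2, List.getD_eq_getElem _ 0 (by omega),
      List.getD_eq_getElem _ 0 (by omega)] at hk
    exact hnodup.getElem_inj_iff.mp hk
  · intro t ht
    have hx : (t : Int) ∈ p.take n := by
      rw [hperm.mem_iff]
      simp only [List.mem_map, List.mem_range]
      exact ⟨t, ht, rfl⟩
    obtain ⟨k, hk, hkeq⟩ := List.mem_iff_getElem.mp hx
    rw [htlen] at hk
    exact ⟨k, hk, by rw [hgetD k hk, List.getD_eq_getElem _ 0 (by omega)]; exact hkeq⟩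

-- ===== VERDICT (by name: the statement is the Claim_ definition above) =====
theorem solve_spec : Claim_equal_solve := by
  intro lst p _ hpre
  unfold Spec_solve solve
  obtain ⟨hrange, hinj, hsurj⟩ := pre_facts lst p hpre
  exact loop_correct (2 * lst.length + 1) 0 lst p hpre.1 hrange hinj hsurj
    (fun k hk => absurd hk (Nat.not_lt_zero k))
    (by have := cntNF_le p lst.length; omega)
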